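-- pv_equiv track=rewrite | github.com/TsaiJT/next_fibonacci | next_fibonacci.py | nextFibonacci
-- ===== SOURCE A (Python) =====
-- def nextFibonacci(num_list):
--     """Show the next Fibonacci number for the element in the list."""
--     """ex. input => [1, 22, 9], output => [2, 34, 13]"""
--
--     # Initial the result list to store the next permutaion num.
--     result_list = [0] * len(num_list)
--
--     # Create a fibonacci list.
--     max_num = max(num_list)
--     fib_list = creatFibList(max_num)
--
--     for index, item in enumerate(num_list):
--     # Find the fib number which is great than the item comparing to the element in fib_list.
--         for fib_num in fib_list:
--             if item < fib_num:
--                 result_list[index] = fib_num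
--                 break
--     return result_list
--
-- def creatFibList(max_num):
--     """Create a fibonacci list which the last item is greater than max_num"""
--     fib_list = [0, 1, 1]
--
--     while fib_list[len(fib_list)-1] <= max_num:
--         fib_list.append(fib_list[len(fib_list)-1]+fib_list[len(fib_list)-2])
--
--     return fib_list
-- ===== SOURCE B (Python) =====
-- def nextFibonacci(num_list):
--     """Show the next Fibonacci number for the element in the list."""
--     result = []
--     for item in num_list:
--         a, b = 0, 1
--         while a <= item:
--             a, b = b, a + b
--         result.append(a)
--     return result
-- ===== Notes on version B (the rewrite author's own statement) =====
-- stated objective: simpler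
-- what changed: B drops the precomputed shared Fibonacci table (max() + creatFibList + inner linear scan per element) and instead steps a single (a,b) Fibonacci pair per element until it exceeds the element, appending it directly.
import Mathlib
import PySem

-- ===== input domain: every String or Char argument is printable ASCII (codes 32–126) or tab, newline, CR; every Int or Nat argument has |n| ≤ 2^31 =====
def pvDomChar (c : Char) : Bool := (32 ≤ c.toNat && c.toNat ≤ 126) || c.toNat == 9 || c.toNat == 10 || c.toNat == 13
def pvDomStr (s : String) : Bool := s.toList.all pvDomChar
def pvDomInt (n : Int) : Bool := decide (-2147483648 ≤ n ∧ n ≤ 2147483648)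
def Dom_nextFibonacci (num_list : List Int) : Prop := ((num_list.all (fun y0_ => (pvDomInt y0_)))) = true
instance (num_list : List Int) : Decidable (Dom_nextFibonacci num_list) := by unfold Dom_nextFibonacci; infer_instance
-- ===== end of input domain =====

-- B replaces A's shared precomputed Fibonacci table (max + linear scan per element)
-- with a per-element running Fibonacci pair, for a simpler one-pass implementation.


-- ===== PORT A =====
-- while-loop of creatFibList, fuel-totalised (the fuel only makes the same loop total:
-- the appended value grows by ≥ 1 per step, so max_num.toNat + 3 steps always suffice).
def fibExtend (maxn : Int) (prev last : Int) : Nat → List Int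
  | 0 => []
  | f + 1 =>
    if last ≤ maxn then (prev + last) :: fibExtend maxn last (prev + last) f else []

def creatFibList (maxn : Int) : List Int :=
  [0, 1, 1] ++ fibExtend maxn 1 1 (maxn.toNat + 3)

-- A's inner for-loop with break: first fib_num with item < fib_num, else the initial 0.
def findFib (item : Int) : List Int → Int
  | [] => 0
  | x :: xs => if item < x then x else findFib item xs

def nextFibonacci (num_list : List Int) : List Int :=
  match PySem.List.max? num_list (fun x => x) with
  | none => []            -- Python: max([]) raises ValueError; excluded by Pre_
  | some maxn =>
    let fib_list := creatFibList maxn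
    num_list.map (fun item => findFib item fib_list)

-- ===== PORT B =====
-- B's while-loop, fuel-totalised (a reaches values 0,1,1,2,3,…; item.toNat + 3 steps suffice).
def nextFib (item a b : Int) : Nat → Int
  | 0 => a
  | f + 1 => if a ≤ item then nextFib item b (a + b) f else a

def nextFibonacci_alt (num_list : List Int) : List Int :=
  num_list.map (fun item => nextFib item 0 1 (item.toNat + 3))

-- ===== PRECONDITION & SPEC =====
-- Pre_ excludes only the empty list, on which Python A raises ValueError (max of empty sequence).
def Pre_nextFibonacci (num_list : List Int) : Prop := num_list ≠ []
instance (num_list : List Int) : Decidable (Pre_nextFibonacci num_list) := by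
  unfold Pre_nextFibonacci; infer_instance

def pvWitness_nextFibonacci : List Int := [1, 22, 9]

def Spec_nextFibonacci (num_list : List Int) (out : List Int) : Prop := out = nextFibonacci_alt num_list
instance (num_list : List Int) (out : List Int) : Decidable (Spec_nextFibonacci num_list out) := by unfold Spec_nextFibonacci; infer_instance

-- ===== CLAIM (what is proved, stated in full; the proofs are below) =====
def Claim_equal_nextFibonacci : Prop := ∀ (num_list : List Int), Dom_nextFibonacci num_list → Pre_nextFibonacci num_list → Spec_nextFibonacci num_list (nextFibonacci num_list)

-- ===== LEMMAS AND PROOFS =====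

-- Core correspondence: at a pair state (a, b) with 1 ≤ a ≤ b, A's scan of the remaining
-- table b :: fibExtend maxn a b fA equals B's continued stepping nextFib item b (a+b) fB,
-- provided both fuels cover the ≤ (item + 1 - b) remaining steps.
theorem findFib_eq_nextFib (item maxn : Int) (hmax : item ≤ maxn) :
    ∀ (fA : Nat) (a b : Int) (fB : Nat), 1 ≤ a → a ≤ b →
    (item + 1 - b).toNat ≤ fA → (item + 1 - b).toNat < fB →
    findFib item (b :: fibExtend maxn a b fA) = nextFib item b (a + b) fB := by
  intro fA
  induction fA with
  | zero =>
    intro a b fB ha hab hfA hfB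
    have hib : item < b := by omega
    obtain ⟨fB', rfl⟩ : ∃ fB', fB = fB' + 1 := ⟨fB - 1, by omega⟩
    simp [findFib, nextFib, hib, not_le.mpr hib]
  | succ fA ih =>
    intro a b fB ha hab hfA hfB
    by_cases hib : item < b
    · obtain ⟨fB', rfl⟩ : ∃ fB', fB = fB' + 1 := ⟨fB - 1, by omega⟩
      simp [findFib, nextFib, hib, not_le.mpr hib]
    · rw [not_lt] at hib
      obtain ⟨fB', rfl⟩ : ∃ fB', fB = fB' + 1 := ⟨fB - 1, by omega⟩
      have hle : b ≤ maxn := le_trans hib hmax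
      have step : findFib item (b :: fibExtend maxn a b (fA + 1))
          = findFib item ((a + b) :: fibExtend maxn b (a + b) fA) := by
        simp [fibExtend, findFib, hle, not_lt.mpr hib]
      rw [step]
      have := ih b (a + b) fB' (by omega) (by omega) (by omega) (by omega)
      rw [this]
      simp [nextFib, hib]

theorem findFib_creat (item maxn : Int) (hmax : item ≤ maxn) :
    findFib item (creatFibList maxn) = nextFib item 0 1 (item.toNat + 3) := by
  by_cases h0 : item < 0
  · simp [creatFibList, findFib, nextFib, h0, not_le.mpr h0]
  · rw [not_lt] at h0
    by_cases h1 : item < 1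
    · have : item = 0 := by omega
      subst this
      simp [creatFibList, findFib, nextFib]
    · rw [not_lt] at h1
      -- item ≥ 1: skip 0 and the first 1, then apply the core lemma at state (1,1)
      have hA : findFib item (creatFibList maxn)
          = findFib item (1 :: fibExtend maxn 1 1 (maxn.toNat + 3)) := by
        simp [creatFibList, findFib, not_lt.mpr h0, not_lt.mpr h1]
      have hB : nextFib item 0 1 (item.toNat + 3)
          = nextFib item 1 2 (item.toNat + 1) := by
        have e0 : nextFib item 0 1 (item.toNat + 3) = nextFib item 1 1 (item.toNat + 2) := by
          simp [nextFib, h0]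
        have e1 : nextFib item 1 1 (item.toNat + 2) = nextFib item 1 2 (item.toNat + 1) := by
          have : (1 : Int) + 1 = 2 := by norm_num
          simp [nextFib, h1, this]
        rw [e0, e1]
      rw [hA, hB]
      have := findFib_eq_nextFib item maxn hmax (maxn.toNat + 3) 1 1 (item.toNat + 1)
        (by omega) (by omega) (by omega) (by omega)
      simpa using this

-- ===== VERDICT (by name: the statement is the Claim_ definition above) =====
theorem nextFibonacci_spec : Claim_equal_nextFibonacci := by
  intro num_list _ hpre
  unfold Spec_nextFibonacci nextFibonacci nextFibonacci_alt
  obtain ⟨maxn, hm⟩ : ∃ m, PySem.List.max? num_list (fun x => x) = some m := by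
    cases h : PySem.List.max? num_list (fun x => x) with
    | none => exact absurd ((PySem.List.max?_eq_none_iff _ _).mp h) hpre
    | some m => exact ⟨m, rfl⟩
  rw [hm]
  refine List.map_congr_left ?_
  intro item hitem
  exact findFib_creat item maxn (PySem.List.max?_isMax hm item hitem)
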